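-- pv_equiv track=rewrite | github.com/David-Tong/lintcode-in-python | 188-insert five/main.py | insert_five
-- ===== SOURCE A (Python) =====
-- def insert_five(a):
--     # write your code here
--     if a >= 0:
--         positive = True
--     else:
--         positive = False
--
--     a = str(abs(a))
--     L = len(a)
--     idx = 0
--     while idx < L:
--         if positive:
--             if a[idx] < '5':
--                 break
--         else:
--             if a[idx] > '5':
--                 break
--         idx += 1
--
--     ans = int(a[:idx] + "5" + a[idx:])
--     if positive:
--         return ans
--     else:
--         return  -1 * ans
--
-- a = -152
-- ===== SOURCE B (Python) =====
-- def insert_five(a):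
--     s = str(abs(a))
--     cands = [s[:i] + "5" + s[i:] for i in range(len(s) + 1)]
--     best = max(cands) if a >= 0 else min(cands)
--     r = int(best)
--     return r if a >= 0 else -r
-- ===== Notes on version B (the rewrite author's own statement) =====
-- stated objective: alternative
-- what changed: A greedily scans the digit string for the single break point and inserts '5' there; B instead generates every insertion position's candidate string and returns the int of the lexicographic max (min for negatives), which equals the numeric max since all candidates have equal length.
import Mathlib
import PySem

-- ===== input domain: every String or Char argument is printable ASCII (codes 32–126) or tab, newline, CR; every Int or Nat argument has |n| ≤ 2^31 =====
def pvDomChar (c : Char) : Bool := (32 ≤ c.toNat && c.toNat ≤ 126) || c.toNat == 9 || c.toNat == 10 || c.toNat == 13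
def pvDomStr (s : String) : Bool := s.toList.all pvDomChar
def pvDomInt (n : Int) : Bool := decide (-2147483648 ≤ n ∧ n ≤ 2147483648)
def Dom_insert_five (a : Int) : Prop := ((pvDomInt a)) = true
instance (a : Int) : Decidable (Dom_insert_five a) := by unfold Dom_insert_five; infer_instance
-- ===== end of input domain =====

-- B replaces A's greedy break-point scan by enumerating every insertion position and taking the
-- lexicographically best candidate string (equal-length digit strings compare like the ints they
-- denote); objective: alternative algorithm, similar cost.

-- ===== PORT A =====
-- A's while loop: idx advances until the break condition fires or the string ends.
def scanA (pos : Bool) (cs : List Char) (idx : Nat) : Nat :=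
  if h : idx < cs.length then
    if (if pos then cs[idx] < '5' else '5' < cs[idx]) then idx
    else scanA pos cs (idx + 1)
  else idx
termination_by cs.length - idx

def insert_five (a : Int) : Int :=
  let positive : Bool := decide (0 ≤ a)
  let s : String := PySem.Int.toStr |a|
  let idx : Nat := scanA positive s.toList 0
  -- int(a[:idx] + "5" + a[idx:]); int() always succeeds on this digit string, .getD 0 only totalises
  let ans : Int := (PySem.Int.ofStr? (PySem.Str.slice s none (some (idx : Int)) ++ "5" ++ PySem.Str.slice s (some (idx : Int)) none)).getD 0
  if positive then ans else -1 * ans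

-- ===== PORT B =====
-- candidate string with '5' inserted at position i: s[:i] + "5" + s[i:]
def insCand (s : String) (i : Int) : String :=
  PySem.Str.slice s none (some i) ++ "5" ++ PySem.Str.slice s (some i) none

def insert_five_alt (a : Int) : Int :=
  let s : String := PySem.Int.toStr |a|
  let cands : List String := (PySem.List.pyRange 0 (PySem.Str.len s + 1) 1).map (insCand s)
  -- max(cands) / min(cands); cands is never empty, .getD "" only totalises
  let best : String := (if 0 ≤ a then PySem.List.max? cands (fun x => x) else PySem.List.min? cands (fun x => x)).getD ""
  let r : Int := (PySem.Int.ofStr? best).getD 0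
  if 0 ≤ a then r else -r

-- ===== PRECONDITION & SPEC =====
def Spec_insert_five (a : Int) (out : Int) : Prop := out = insert_five_alt a
instance (a : Int) (out : Int) : Decidable (Spec_insert_five a out) := by unfold Spec_insert_five; infer_instance

-- ===== CLAIM (what is proved, stated in full; the proofs are below) =====
def Claim_equal_insert_five : Prop := ∀ (a : Int), Dom_insert_five a → Spec_insert_five a (insert_five a)

-- ===== LEMMAS AND PROOFS =====

-- list-level candidate: '5' inserted at position i
def insL (cs : List Char) (i : Nat) : List Char := cs.take i ++ '5' :: cs.drop i

theorem lex_mid {x y : Char} (h : x < y) (pre u v : List Char) :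
    List.Lex (· < ·) (pre ++ x :: u) (pre ++ y :: v) := by
  induction pre with
  | nil => exact List.Lex.rel h
  | cons c pre ih => exact List.Lex.cons ih

theorem insL_decomp (cs : List Char) {i j : Nat} (hi : i < cs.length) (hij : i < j) :
    insL cs j = cs.take i ++ cs[i] :: ((cs.drop (i+1)).take (j-i-1) ++ '5' :: cs.drop j) := by
  unfold insL
  have h1 : j = i + (1 + (j - i - 1)) := by omega
  rw [h1, List.take_add, List.take_add]
  have h2 : (cs.drop i).take 1 = [cs[i]] := by
    rw [← List.getElem_cons_drop hi]; rfl
  have h3 : (cs.drop i).drop 1 = cs.drop (i+1) := by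
    rw [List.drop_drop]
  rw [h2, h3]
  simp

theorem insL_self (cs : List Char) {i : Nat} (hi : i < cs.length) :
    insL cs i = cs.take i ++ '5' :: cs[i] :: cs.drop (i+1) := by
  unfold insL
  rw [← List.getElem_cons_drop hi]

theorem toList_insCand (s : String) (i : Nat) :
    (insCand s (i : Int)).toList = insL s.toList i := by
  unfold insCand insL
  simp [String.toList_append, PySem.Str.toList_slice, PySem.Chars.slice_eq_listSlice,
    PySem.List.slice_to _ (by positivity : (0:Int) ≤ i), PySem.List.slice_from _ (by positivity : (0:Int) ≤ i)]

theorem string_lt_of_lex {S T : String} (h : List.Lex (· < ·) S.toList T.toList) : S < T := by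
  rw [String.lt_iff_toList_lt]
  exact (List.lt_iff_lex_lt _ _).mpr h

-- the break position beats every later insertion position
theorem skip_lt (cs : List Char) {i j : Nat} (hi : i < cs.length) (hij : i < j)
    (h : cs[i] < '5') : List.Lex (· < ·) (insL cs j) (insL cs i) := by
  rw [insL_decomp cs hi hij, insL_self cs hi]
  exact lex_mid h _ _ _

theorem skip_gt (cs : List Char) {i j : Nat} (hi : i < cs.length) (hij : i < j)
    (h : '5' < cs[i]) : List.Lex (· < ·) (insL cs i) (insL cs j) := by
  rw [insL_decomp cs hi hij, insL_self cs hi]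
  exact lex_mid h _ _ _

theorem insL_eq_succ (cs : List Char) {i : Nat} (hi : i < cs.length) (h : cs[i] = '5') :
    insL cs i = insL cs (i+1) := by
  rw [insL_self cs hi]
  unfold insL
  rw [List.take_add_one, List.getElem?_eq_getElem hi]
  simp [h]

-- adjacent steps expressed on strings (≤), positive and negative variants
theorem step_pos (s : String) {i : Nat} (hi : i < s.toList.length) (h : ¬ s.toList[i] < '5') :
    insCand s (i : Int) ≤ insCand s ((i+1 : Nat) : Int) := by
  rcases lt_or_eq_of_le (le_of_not_gt h) with h5 | h5
  · exact le_of_lt (string_lt_of_lex (by rw [toList_insCand, toList_insCand]; exact skip_gt s.toList hi (by omega) h5))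
  · apply le_of_eq
    rw [← String.toList_inj, toList_insCand, toList_insCand]
    exact insL_eq_succ s.toList hi h5.symm

theorem step_neg (s : String) {i : Nat} (hi : i < s.toList.length) (h : ¬ '5' < s.toList[i]) :
    insCand s ((i+1 : Nat) : Int) ≤ insCand s (i : Int) := by
  rcases lt_or_eq_of_le (le_of_not_gt h) with h5 | h5
  · exact le_of_lt (string_lt_of_lex (by rw [toList_insCand, toList_insCand]; exact skip_lt s.toList hi (by omega) h5))
  · apply le_of_eq
    rw [← String.toList_inj, toList_insCand, toList_insCand]
    exact (insL_eq_succ s.toList hi h5).symm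

-- characterisation of A's while loop
theorem scanA_spec (pos : Bool) (cs : List Char) (idx : Nat) (h : idx ≤ cs.length) :
    idx ≤ scanA pos cs idx ∧ scanA pos cs idx ≤ cs.length ∧
    (∀ m (hm : m < cs.length), idx ≤ m → m < scanA pos cs idx →
      ¬ (if pos then cs[m] < '5' else '5' < cs[m])) ∧
    (scanA pos cs idx = cs.length ∨
      ∃ hm : scanA pos cs idx < cs.length,
        (if pos then cs[scanA pos cs idx]'hm < '5' else '5' < cs[scanA pos cs idx]'hm)) := by
  fun_induction scanA pos cs idx with
  | case1 idx h1 hbrk =>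
      refine ⟨le_refl _, le_of_lt h1, ?_, Or.inr ⟨h1, hbrk⟩⟩
      intro m hm h2 h3; omega
  | case2 idx h1 hbrk ih =>
      obtain ⟨a1, a2, a3, a4⟩ := ih (by omega)
      refine ⟨by omega, a2, ?_, a4⟩
      intro m hm h2 h3
      rcases Nat.eq_or_lt_of_le h2 with rfl | h4
      · exact hbrk
      · exact a3 m hm h4 h3
  | case3 idx h1 =>
      refine ⟨le_refl _, by omega, ?_, Or.inl (by omega)⟩
      intro m hm h2 h3; omega

-- A's break position yields the lex-greatest candidate (positive case)
theorem greedy_max (s : String) :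
    ∀ j : Nat, j ≤ s.toList.length →
      insCand s (j : Int) ≤ insCand s ((scanA true s.toList 0 : Nat) : Int) := by
  obtain ⟨a1, a2, a3, a4⟩ := scanA_spec true s.toList 0 (Nat.zero_le _)
  set idx := scanA true s.toList 0 with hidx
  have chain : ∀ d jj, jj + d = idx → insCand s (jj : Int) ≤ insCand s (idx : Int) := by
    intro d
    induction d with
    | zero =>
        intro jj hjj
        have h0 : jj = idx := by omega
        rw [h0]
    | succ d ih =>
        intro jj hjj
        have hjjlt : jj < s.toList.length := by omega
        have hnb := a3 jj hjjlt (by omega) (by omega)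
        simp only [if_true] at hnb
        exact le_trans (step_pos s hjjlt hnb) (ih (jj+1) (by omega))
  intro j hj
  by_cases hle : j ≤ idx
  · exact chain (idx - j) j (by omega)
  · have hgt : idx < j := by omega
    have hidxlt : idx < s.toList.length := by omega
    have hbrk : s.toList[idx] < '5' := by
      rcases a4 with he | ⟨hm, hb⟩
      · omega
      · simpa using hb
    exact le_of_lt (string_lt_of_lex (by rw [toList_insCand, toList_insCand]; exact skip_lt s.toList hidxlt hgt hbrk))

-- A's break position yields the lex-least candidate (negative case)
theorem greedy_min (s : String) :
    ∀ j : Nat, j ≤ s.toList.length →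
      insCand s ((scanA false s.toList 0 : Nat) : Int) ≤ insCand s (j : Int) := by
  obtain ⟨a1, a2, a3, a4⟩ := scanA_spec false s.toList 0 (Nat.zero_le _)
  set idx := scanA false s.toList 0 with hidx
  have chain : ∀ d jj, jj + d = idx → insCand s (idx : Int) ≤ insCand s (jj : Int) := by
    intro d
    induction d with
    | zero =>
        intro jj hjj
        have h0 : jj = idx := by omega
        rw [h0]
    | succ d ih =>
        intro jj hjj
        have hjjlt : jj < s.toList.length := by omega
        have hnb := a3 jj hjjlt (by omega) (by omega)
        exact le_trans (ih (jj+1) (by omega)) (step_neg s hjjlt hnb)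
  intro j hj
  by_cases hle : j ≤ idx
  · exact chain (idx - j) j (by omega)
  · have hgt : idx < j := by omega
    have hidxlt : idx < s.toList.length := by omega
    have hbrk : '5' < s.toList[idx] := by
      rcases a4 with he | ⟨hm, hb⟩
      · omega
      · simpa using hb
    exact le_of_lt (string_lt_of_lex (by rw [toList_insCand, toList_insCand]; exact skip_gt s.toList hidxlt hgt hbrk))

theorem pyRange01 (n : Nat) : PySem.List.pyRange 0 (n : Int) 1 = (List.range n).map (fun k => (k : Int)) := by
  unfold PySem.List.pyRange
  simp
  split
  · simp [List.map_eq_flatMap]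
  · have : n = 0 := by omega
    simp [this]

theorem cands_eq (s : String) :
    (PySem.List.pyRange 0 (PySem.Str.len s + 1) 1).map (insCand s)
      = (List.range (s.toList.length + 1)).map (fun k : Nat => insCand s (k : Int)) := by
  rw [PySem.Str.len_eq]
  have : (s.toList.length : Int) + 1 = ((s.toList.length + 1 : Nat) : Int) := by push_cast; ring
  rw [this, pyRange01, List.map_map]
  induction (List.range (s.toList.length + 1)) with
  | nil => simp
  | cons x xs ih => simp_all

theorem main_thm (a : Int) : insert_five a = insert_five_alt a := by
  unfold insert_five insert_five_alt
  simp only []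
  set s := PySem.Int.toStr |a| with hs
  by_cases ha : 0 ≤ a
  · simp only [ha, decide_true, if_true]
    set idx := scanA true s.toList 0 with hidx
    obtain ⟨a1, a2, a3, a4⟩ := scanA_spec true s.toList 0 (Nat.zero_le _)
    rw [cands_eq]
    set cands := (List.range (s.toList.length + 1)).map (fun k : Nat => insCand s (k : Int)) with hcands
    have hmem : insCand s (idx : Int) ∈ cands := by
      rw [hcands]
      exact List.mem_map.mpr ⟨idx, List.mem_range.mpr (by omega), rfl⟩
    have hne : cands ≠ [] := by
      rw [hcands]; simp [List.range_succ]
    obtain ⟨m, hm⟩ : ∃ m, PySem.List.max? cands (fun x => x) = some m := by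
      rcases h : PySem.List.max? cands (fun x => x) with _ | m
      · exact absurd ((PySem.List.max?_eq_none_iff cands _).mp h) hne
      · exact ⟨m, rfl⟩
    have hmeq : m = insCand s (idx : Int) := by
      apply le_antisymm
      · obtain ⟨k, hk, hkm⟩ := List.mem_map.mp (PySem.List.max?_mem hm)
        rw [← hkm]
        exact greedy_max s k (by have := List.mem_range.mp hk; omega)
      · exact PySem.List.max?_isMax hm _ hmem
    rw [hm]
    simp only [Option.getD_some, hmeq]
    rfl
  · simp only [ha, decide_false, if_false]
    set idx := scanA false s.toList 0 with hidx
    obtain ⟨a1, a2, a3, a4⟩ := scanA_spec false s.toList 0 (Nat.zero_le _)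
    rw [cands_eq]
    set cands := (List.range (s.toList.length + 1)).map (fun k : Nat => insCand s (k : Int)) with hcands
    have hmem : insCand s (idx : Int) ∈ cands := by
      rw [hcands]
      exact List.mem_map.mpr ⟨idx, List.mem_range.mpr (by omega), rfl⟩
    have hne : cands ≠ [] := by
      rw [hcands]; simp [List.range_succ]
    obtain ⟨m, hm⟩ : ∃ m, PySem.List.min? cands (fun x => x) = some m := by
      rcases h : PySem.List.min? cands (fun x => x) with _ | m
      · exact absurd ((PySem.List.min?_eq_none_iff cands _).mp h) hne
      · exact ⟨m, rfl⟩
    have hmeq : m = insCand s (idx : Int) := by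
      apply le_antisymm
      · exact PySem.List.min?_isMin hm _ hmem
      · obtain ⟨k, hk, hkm⟩ := List.mem_map.mp (PySem.List.min?_mem hm)
        rw [← hkm]
        exact greedy_min s k (by have := List.mem_range.mp hk; omega)
    rw [hm]
    simp only [Option.getD_some, hmeq]
    simp [insCand]

-- ===== VERDICT (by name: the statement is the Claim_ definition above) =====
theorem insert_five_spec : Claim_equal_insert_five := by
  intro a _
  unfold Spec_insert_five
  exact main_thm a
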